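-- pv_equiv track=rewrite | github.com/fernsky/pokhara-delivery-admin | buddhashanti-reporting/apps/demographics/utils/svg_utils.py | convert_number_to_nepali
-- ===== SOURCE A (Python) =====
-- def convert_number_to_nepali(number):
--     """Convert English numbers to Nepali numerals"""
--     nepali_digits = {
--         '0': '०', '1': '१', '2': '२', '3': '३', '4': '४',
--         '5': '५', '6': '६', '7': '७', '8': '८', '9': '९'
--     }
--     result = str(number)
--     for eng, nep in nepali_digits.items():
--         result = result.replace(eng, nep)
--     return result
-- ===== SOURCE B (Python) =====
-- def convert_number_to_nepali(number):
--     """Convert English numbers to Nepali numerals"""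
--     nepali_digits = {
--         '0': '०', '1': '१', '2': '२', '3': '३', '4': '४',
--         '5': '५', '6': '६', '7': '७', '8': '८', '9': '९'
--     }
--     return ''.join(nepali_digits.get(c, c) for c in str(number))
-- ===== Notes on version B (the rewrite author's own statement) =====
-- stated objective: simpler
-- what changed: One pass over the characters of str(number) with a per-character dict lookup (falling back to the character itself), instead of ten replace passes that each rescan the whole string.
import Mathlib
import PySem

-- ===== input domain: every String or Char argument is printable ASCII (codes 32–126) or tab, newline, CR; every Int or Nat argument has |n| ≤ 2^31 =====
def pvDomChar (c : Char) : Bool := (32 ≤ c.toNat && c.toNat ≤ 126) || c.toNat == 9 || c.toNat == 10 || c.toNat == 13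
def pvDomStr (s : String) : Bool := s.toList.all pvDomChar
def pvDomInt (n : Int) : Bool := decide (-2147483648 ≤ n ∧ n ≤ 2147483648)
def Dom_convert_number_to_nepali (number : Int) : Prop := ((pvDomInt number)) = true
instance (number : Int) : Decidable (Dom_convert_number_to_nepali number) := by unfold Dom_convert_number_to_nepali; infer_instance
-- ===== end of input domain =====

-- B builds the result in one pass over the characters of str(number) with a per-character
-- dict lookup (falling back to the character itself) instead of A's ten whole-string
-- replace passes (objective: simpler).


-- ===== PORT A =====
def convert_number_to_nepali (number : Int) : String :=
  let nepali_digits : PySem.Dict String String := PySem.Dict.mk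
    [("0", "०"), ("1", "१"), ("2", "२"), ("3", "३"), ("4", "४"),
     ("5", "५"), ("6", "६"), ("7", "७"), ("8", "८"), ("9", "९")]
  nepali_digits.items.foldl (fun result p => PySem.Str.replace result p.1 p.2)
    (PySem.Int.toStr number)

-- ===== PORT B =====
def convert_number_to_nepali_alt (number : Int) : String :=
  let nepali_digits : PySem.Dict Char Char := PySem.Dict.mk
    [('0', '०'), ('1', '१'), ('2', '२'), ('3', '३'), ('4', '४'),
     ('5', '५'), ('6', '६'), ('7', '७'), ('8', '८'), ('9', '९')]
  String.ofList ((PySem.Int.toChars number).map (fun c => nepali_digits.getD c c))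

-- ===== PRECONDITION & SPEC =====
def Spec_convert_number_to_nepali (number : Int) (out : String) : Prop := out = convert_number_to_nepali_alt number
instance (number : Int) (out : String) : Decidable (Spec_convert_number_to_nepali number out) := by unfold Spec_convert_number_to_nepali; infer_instance

-- ===== CLAIM (what is proved, stated in full; the proofs are below) =====
def Claim_equal_convert_number_to_nepali : Prop := ∀ (number : Int), Dom_convert_number_to_nepali number → Spec_convert_number_to_nepali number (convert_number_to_nepali number)

-- ===== LEMMAS AND PROOFS =====

-- replacing a single character e by n is the pointwise map over the characters
lemma go_single (e n : Char) :
    ∀ (l : List Char) (fuel : Nat) (acc : List Char), l.length ≤ fuel →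
      PySem.Chars.replace.go [e] [n] fuel l acc
        = acc.reverse ++ l.map (fun c => if e == c then n else c) := by
  intro l
  induction l with
  | nil =>
      intro fuel acc _
      cases fuel <;> simp [PySem.Chars.replace.go]
  | cons c t ih =>
      intro fuel acc hf
      cases fuel with
      | zero => simp at hf
      | succ m =>
          simp only [List.length_cons, Nat.succ_le_succ_iff] at hf
          by_cases h : e = c
          · subst h
            simp [PySem.Chars.replace.go, List.isPrefixOf, ih m _ hf]
          · have hb : (e == c) = false := by simp [h]
            simp [PySem.Chars.replace.go, List.isPrefixOf, hb, ih m _ hf, h]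

lemma replace_single (cs : List Char) (e n : Char) :
    PySem.Chars.replace cs [e] [n] = cs.map (fun c => if e == c then n else c) := by
  simp [PySem.Chars.replace, go_single e n cs cs.length [] (le_refl _)]

-- applying a list of (source, target) substitutions to one character, in order
def applyChain (ps : List (Char × Char)) (c : Char) : Char :=
  ps.foldl (fun x p => if (p.1 == x) = true then p.2 else x) c

lemma applyChain_id (x : Char) :
    ∀ ps : List (Char × Char), (∀ q ∈ ps, (q.1 == x) = false) → applyChain ps x = x := by
  intro ps
  induction ps with
  | nil => intro _; rfl
  | cons p rest ih =>
      intro h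
      have hp := h p (List.mem_cons_self)
      simp only [applyChain, List.foldl_cons, hp, Bool.false_eq_true, if_false]
      exact ih (fun q hq => h q (List.mem_cons_of_mem _ hq))

-- the chain of single-character substitutions equals one dict lookup, provided
-- no substitution target is itself a substitution source
lemma applyChain_eq_getD :
    ∀ (ps : List (Char × Char)) (c : Char),
      (∀ p ∈ ps, ∀ q ∈ ps, (q.1 == p.2) = false) →
      applyChain ps c = (PySem.Dict.mk ps).getD c c := by
  intro ps
  induction ps with
  | nil => intro c _; rfl
  | cons p rest ih =>
      intro c h
      have hrest : ∀ a ∈ rest, ∀ b ∈ rest, (b.1 == a.2) = false :=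
        fun a ha b hb => h a (List.mem_cons_of_mem _ ha) b (List.mem_cons_of_mem _ hb)
      cases hb : p.1 == c with
      | true =>
          have htgt : ∀ q ∈ rest, (q.1 == p.2) = false :=
            fun q hq => h p List.mem_cons_self q (List.mem_cons_of_mem _ hq)
          simp only [applyChain, List.foldl_cons, hb, if_true]
          rw [show (rest.foldl (fun x p => if (p.1 == x) = true then p.2 else x) p.2)
                = applyChain rest p.2 from rfl,
              applyChain_id p.2 rest htgt]
          simp [PySem.Dict.getD, PySem.Dict.get?, List.find?, hb]
      | false =>
          simp only [applyChain, List.foldl_cons, hb, Bool.false_eq_true, if_false]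
          rw [show (rest.foldl (fun x p => if (p.1 == x) = true then p.2 else x) c)
                = applyChain rest c from rfl, ih c hrest]
          simp [PySem.Dict.getD, PySem.Dict.get?, List.find?, hb]

-- A's left fold of single-character replace passes, written over an arbitrary
-- substitution list, is one map of the per-character substitution chain
lemma fold_replace_map (qs : List (Char × Char)) :
    ∀ cs : List Char,
      ((qs.map (fun q => (String.ofList [q.1], String.ofList [q.2]))).foldl
          (fun (res : String) p => PySem.Str.replace res p.1 p.2) (String.ofList cs)).toList
        = cs.map (fun ch => applyChain qs ch) := by
  induction qs with
  | nil => intro cs; simp [applyChain]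
  | cons q rest ih =>
      intro cs
      simp only [List.map_cons, List.foldl_cons]
      have h1 : PySem.Str.replace (String.ofList cs) (String.ofList [q.1]) (String.ofList [q.2])
          = String.ofList (cs.map (fun c => if (q.1 == c) = true then q.2 else c)) := by
        simp [PySem.Str.replace, replace_single]
      rw [h1, ih, List.map_map]
      rfl

-- no substitution target ('०'..'९') is a substitution source ('0'..'9')
set_option maxHeartbeats 4000000 in
lemma nep_cond : ∀ p ∈ ([('0', '०'), ('1', '१'), ('2', '२'), ('3', '३'), ('4', '४'),
     ('5', '५'), ('6', '६'), ('7', '७'), ('8', '८'), ('9', '९')] : List (Char × Char)),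
    ∀ q ∈ ([('0', '०'), ('1', '१'), ('2', '२'), ('3', '३'), ('4', '४'),
     ('5', '५'), ('6', '६'), ('7', '७'), ('8', '८'), ('9', '९')] : List (Char × Char)),
    (q.1 == p.2) = false := by decide

set_option maxHeartbeats 1000000 in
theorem convert_number_to_nepali_spec : Claim_equal_convert_number_to_nepali := by
  intro number _
  show convert_number_to_nepali number = convert_number_to_nepali_alt number
  unfold convert_number_to_nepali convert_number_to_nepali_alt
  dsimp only
  refine String.toList_inj.mp ?_
  rw [show PySem.Int.toStr number = String.ofList (PySem.Int.toChars number) from by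
        rw [← PySem.Int.toList_toStr, String.ofList_toList]]
  rw [show ([("0", "०"), ("1", "१"), ("2", "२"), ("3", "३"), ("4", "४"),
         ("5", "५"), ("6", "६"), ("7", "७"), ("8", "८"), ("9", "९")]
          : List (String × String))
      = ([('0', '०'), ('1', '१'), ('2', '२'), ('3', '३'), ('4', '४'),
          ('5', '५'), ('6', '६'), ('7', '७'), ('8', '८'), ('9', '९')].map
            (fun q => (String.ofList [q.1], String.ofList [q.2]))) from rfl]
  rw [fold_replace_map, String.toList_ofList]
  exact List.map_congr_left (fun c _ => applyChain_eq_getD _ c nep_cond)
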